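-- pv_equiv track=rewrite | github.com/morikonon/PP2 | lab4/generators/2.py | generators
-- ===== SOURCE A (Python) =====
-- def generators(start , stop):
-- 	num = start
-- 	while num <= stop:
-- 		if num % 2 == 0:
-- 			yield num
-- 			num+=1
-- 		else:
-- 			num+=1
-- ===== SOURCE B (Python) =====
-- def generators(start, stop):
--     first = start if start % 2 == 0 else start + 1
--     yield from range(first, stop + 1, 2)
-- ===== Notes on version B (the rewrite author's own statement) =====
-- stated objective: idiomatic
-- what changed: B computes the first even number once and yields directly from range(first, stop+1, 2), traversing only the even values with no per-integer parity branch, instead of A's scan over every integer with an if filter.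
import Mathlib
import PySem

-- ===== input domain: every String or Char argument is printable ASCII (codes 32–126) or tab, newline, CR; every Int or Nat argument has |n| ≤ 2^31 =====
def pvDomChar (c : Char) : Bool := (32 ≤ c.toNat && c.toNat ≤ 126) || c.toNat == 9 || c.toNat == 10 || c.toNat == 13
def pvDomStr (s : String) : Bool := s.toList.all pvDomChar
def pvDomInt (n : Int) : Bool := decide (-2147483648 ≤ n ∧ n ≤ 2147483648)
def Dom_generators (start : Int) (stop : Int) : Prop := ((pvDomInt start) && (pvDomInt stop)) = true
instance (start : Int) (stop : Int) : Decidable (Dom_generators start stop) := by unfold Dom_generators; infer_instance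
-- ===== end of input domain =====

-- B replaces A's per-integer scan-and-filter with a direct step-of-2 range from the first even number (idiomatic; half the iterations).

-- ===== PORT A =====
-- A's while loop: scan every integer num = start..stop, yield the even ones.
def generatorsLoop (num : Int) (stop : Int) : List Int :=
  if _h : num ≤ stop then
    if PySem.Int.mod num 2 == 0 then
      num :: generatorsLoop (num + 1) stop
    else
      generatorsLoop (num + 1) stop
  else []
termination_by (stop + 1 - num).toNat
decreasing_by all_goals (simp_wf; omega)

def generators (start : Int) (stop : Int) : List Int :=
  generatorsLoop start stop

-- ===== PORT B =====
def generators_alt (start : Int) (stop : Int) : List Int :=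
  let first := if PySem.Int.mod start 2 == 0 then start else start + 1
  PySem.List.pyRange first (stop + 1) 2

-- ===== PRECONDITION & SPEC =====
def Spec_generators (start : Int) (stop : Int) (out : List Int) : Prop := out = generators_alt start stop
instance (start : Int) (stop : Int) (out : List Int) : Decidable (Spec_generators start stop out) := by unfold Spec_generators; infer_instance

-- ===== CLAIM (what is proved, stated in full; the proofs are below) =====
def Claim_equal_generators : Prop := ∀ (start : Int) (stop : Int), Dom_generators start stop → Spec_generators start stop (generators start stop)

-- ===== LEMMAS AND PROOFS =====

theorem pymod_two (n : Int) : PySem.Int.mod n 2 = n % 2 := by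
  simp [PySem.Int.mod, Int.fmod_eq_emod]

theorem pyRange_two_nil (a b : Int) (h : b ≤ a) : PySem.List.pyRange a b 2 = [] := by
  rw [PySem.List.pyRange_of_pos a b (by norm_num)]
  simp [show ¬ a < b by omega]

theorem pyRange_two_cons (a b : Int) (h : a < b) :
    PySem.List.pyRange a b 2 = a :: PySem.List.pyRange (a + 2) b 2 := by
  rw [PySem.List.pyRange_of_pos a b (by norm_num),
      PySem.List.pyRange_of_pos (a + 2) b (by norm_num)]
  by_cases h2 : a + 2 < b
  · have hc : ((b - a + 2 - 1) / 2).toNat = ((b - (a + 2) + 2 - 1) / 2).toNat + 1 := by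
      have e : b - a + 2 - 1 = (b - (a + 2) + 2 - 1) + 1 * 2 := by ring
      rw [e, Int.add_mul_ediv_right _ _ (by norm_num)]
      omega
    simp only [if_pos h, if_pos h2, hc, List.range_succ_eq_map, List.map_cons, List.map_map]
    congr 1
    · norm_num
    · apply List.map_congr_left
      intro k _
      simp only [Function.comp]
      push_cast
      ring
  · have hc : ((b - a + 2 - 1) / 2).toNat = 1 := by
      have h1 : b - a + 2 - 1 = (b - a + 1) := by ring
      rw [h1]
      have : (b - a + 1) / 2 = 1 := by omega
      rw [this]; rfl
    simp [if_pos h, if_neg h2, hc, List.range_succ_eq_map]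

theorem loop_body (stop num : Int) :
    generatorsLoop num stop =
      PySem.List.pyRange (if PySem.Int.mod num 2 == 0 then num else num + 1) (stop + 1) 2 := by
  rw [generatorsLoop]
  by_cases he : num % 2 = 0
  case pos =>
    have hb : (PySem.Int.mod num 2 == 0) = true := by simp [pymod_two, he]
    have hb2 : (PySem.Int.mod (num + 1) 2 == 0) = false := by simp [pymod_two]; omega
    by_cases h : num <= stop
    · rw [dif_pos h, if_pos hb, if_pos hb, loop_body stop (num + 1), if_neg (by simp [pymod_two]; omega)]
      rw [pyRange_two_cons num (stop + 1) (by omega)]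
      have e : num + 1 + 1 = num + 2 := by ring
      rw [e]
    · rw [dif_neg h, if_pos hb, pyRange_two_nil _ _ (by omega)]
  case neg =>
    have hb : (PySem.Int.mod num 2 == 0) = false := by simp [pymod_two]; omega
    have hb2 : (PySem.Int.mod (num + 1) 2 == 0) = true := by simp [pymod_two]; omega
    by_cases h : num <= stop
    · rw [dif_pos h, if_neg (by simp [pymod_two]; omega), if_neg (by simp [pymod_two]; omega), loop_body stop (num + 1),
        if_pos hb2]
    · rw [dif_neg h, if_neg (by simp [pymod_two]; omega), pyRange_two_nil _ _ (by omega)]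
termination_by (stop + 1 - num).toNat
decreasing_by all_goals (simp_wf; omega)

-- ===== VERDICT (by name: the statement is the Claim_ definition above) =====
theorem generators_spec : Claim_equal_generators := by
  intro start stop _
  unfold Spec_generators generators generators_alt
  exact loop_body stop start
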